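-- pv_equiv track=rewrite | github.com/juliamendelsohn/framing | code/classify/lexicon_baseline/mfc_classify_frames.py | label_tweet
-- ===== SOURCE A (Python) =====
-- def label_tweet(tokens,pmi_lexicon,min_words=2):
-- 	labels = []
-- 	for frame in pmi_lexicon:
-- 		lex = set(pmi_lexicon[frame])
-- 		num_frame_words_in_tweet = len([x for x in tokens if x in lex])
-- 		if num_frame_words_in_tweet >= min_words:
-- 			labels.append(frame)
-- 	return labels
-- ===== SOURCE B (Python) =====
-- def label_tweet(tokens, pmi_lexicon, min_words=2):
--     # Index the tokens once, then score each frame by summing counts over its distinct lexicon words.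
--     cnt = {}
--     for t in tokens:
--         cnt[t] = cnt.get(t, 0) + 1
--     labels = []
--     for frame in pmi_lexicon:
--         num = sum(cnt.get(w, 0) for w in set(pmi_lexicon[frame]))
--         if num >= min_words:
--             labels.append(frame)
--     return labels
-- ===== Notes on version B (the rewrite author's own statement) =====
-- stated objective: faster
-- what changed: Instead of rescanning all tokens for every frame, B builds one frequency table of the tokens and scores each frame by summing the counts of its distinct lexicon words.
import Mathlib
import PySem

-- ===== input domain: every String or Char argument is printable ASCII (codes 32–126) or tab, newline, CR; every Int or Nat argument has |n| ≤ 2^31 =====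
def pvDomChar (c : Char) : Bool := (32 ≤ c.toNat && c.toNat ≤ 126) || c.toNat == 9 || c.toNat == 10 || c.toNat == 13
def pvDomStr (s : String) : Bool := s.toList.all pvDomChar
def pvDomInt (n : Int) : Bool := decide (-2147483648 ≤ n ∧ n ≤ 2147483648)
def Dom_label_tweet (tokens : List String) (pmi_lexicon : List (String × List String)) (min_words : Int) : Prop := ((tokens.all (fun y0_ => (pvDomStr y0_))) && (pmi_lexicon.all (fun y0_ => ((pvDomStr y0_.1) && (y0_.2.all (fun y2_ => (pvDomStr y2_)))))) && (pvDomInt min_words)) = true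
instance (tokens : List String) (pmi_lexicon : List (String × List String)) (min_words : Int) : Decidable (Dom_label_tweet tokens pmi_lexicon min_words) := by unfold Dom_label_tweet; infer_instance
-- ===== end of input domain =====

-- B replaces A's per-frame rescan of the tokens by one token frequency table queried per distinct lexicon word (faster in a timing run mechanism: one pass over tokens).


-- ===== PORT A =====
def label_tweet (tokens : List String) (pmi_lexicon : List (String × List String)) (min_words : Int) : List String :=
  pmi_lexicon.foldl (fun labels p =>
    let lex : PySem.Set String := PySem.Set.ofList p.2
    let num_frame_words_in_tweet : Int := ((tokens.filter (fun x => PySem.Set.contains lex x)).length : Int)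
    if num_frame_words_in_tweet ≥ min_words then labels ++ [p.1] else labels) []

-- ===== PORT B =====
def label_tweet_alt (tokens : List String) (pmi_lexicon : List (String × List String)) (min_words : Int) : List String :=
  let cnt : PySem.Dict String Int := tokens.foldl (fun d t => d.insert t (d.getD t 0 + 1)) PySem.Dict.empty
  pmi_lexicon.foldl (fun labels p =>
    let num : Int := ((PySem.Set.ofList p.2).map (fun w => cnt.getD w 0)).sum
    if num ≥ min_words then labels ++ [p.1] else labels) []

-- ===== PRECONDITION & SPEC =====
def Spec_label_tweet (tokens : List String) (pmi_lexicon : List (String × List String)) (min_words : Int) (out : List String) : Prop := out = label_tweet_alt tokens pmi_lexicon min_words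
instance (tokens : List String) (pmi_lexicon : List (String × List String)) (min_words : Int) (out : List String) : Decidable (Spec_label_tweet tokens pmi_lexicon min_words out) := by unfold Spec_label_tweet; infer_instance

-- ===== CLAIM (what is proved, stated in full; the proofs are below) =====
def Claim_equal_label_tweet : Prop := ∀ (tokens : List String) (pmi_lexicon : List (String × List String)) (min_words : Int), Dom_label_tweet tokens pmi_lexicon min_words → Spec_label_tweet tokens pmi_lexicon min_words (label_tweet tokens pmi_lexicon min_words)

-- ===== LEMMAS AND PROOFS =====

-- casting a Nat-valued map-sum to Int
lemma sum_map_cast (l : List String) (f : String → Nat) :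
    (l.map (fun w => (f w : Int))).sum = ((l.map f).sum : Int) := by
  induction l with
  | nil => simp
  | cons a l ih => simp [ih]

-- sum over a duplicate-free list of indicator values
lemma sum_ite_eq_contains (ws : List String) (t : String) (h : ws.Nodup) :
    (ws.map (fun w => if t == w then 1 else 0)).sum = (if ws.contains t then 1 else 0 : Nat) := by
  induction ws with
  | nil => simp
  | cons w ws ih =>
    simp only [List.nodup_cons] at h
    rw [List.map_cons, List.sum_cons, ih h.2]
    by_cases ht : w = t
    · subst ht
      simp
      exact h.1
    · by_cases hc : ws.contains t <;> simp only [hc, Bool.or_true, Bool.or_false, List.contains_cons] <;> simp [Ne.symm ht]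

-- summing token counts over the distinct lexicon words counts the tokens that lie in the lexicon
lemma sum_count_eq_countP (ws ts : List String) (h : ws.Nodup) :
    (ws.map (fun w => ts.count w)).sum = ts.countP (fun x => ws.contains x) := by
  induction ts with
  | nil => simp
  | cons t ts ih =>
    have hsplit : ws.map (fun w => (t :: ts).count w)
        = ws.map (fun w => ts.count w + if t == w then 1 else 0) :=
      List.map_congr_left (fun w _ => by rw [List.count_cons])
    rw [hsplit, List.sum_map_add, ih, List.countP_cons, sum_ite_eq_contains ws t h]

-- per-frame score equality: B's sum of table lookups equals A's filter length
lemma frame_score_eq (tokens words : List String) :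
    ((PySem.Set.ofList words).map
        (fun w => (tokens.foldl (fun d t => d.insert t (d.getD t 0 + 1)) PySem.Dict.empty).getD w 0)).sum
      = ((tokens.filter (fun x => PySem.Set.contains (PySem.Set.ofList words) x)).length : Int) := by
  have hmap : (PySem.Set.ofList words).map
      (fun w => (tokens.foldl (fun d t => d.insert t (d.getD t 0 + 1)) PySem.Dict.empty).getD w 0)
      = (PySem.Set.ofList words).map (fun w => (tokens.count w : Int)) :=
    List.map_congr_left (fun w _ => by
      simpa using PySem.Dict.getD_foldl_insert_add_one (l := tokens) (d := PySem.Dict.empty) (v := w))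
  rw [hmap, sum_map_cast,
    sum_count_eq_countP (PySem.Set.ofList words) tokens (PySem.Set.nodup_ofList words),
    List.countP_eq_length_filter]
  rfl

-- ===== VERDICT (by name: the statement is the Claim_ definition above) =====
theorem label_tweet_spec : Claim_equal_label_tweet := by
  intro tokens pmi_lexicon min_words _hdom
  unfold Spec_label_tweet label_tweet label_tweet_alt
  show pmi_lexicon.foldl (fun labels p =>
      if ((tokens.filter (fun x => PySem.Set.contains (PySem.Set.ofList p.2) x)).length : Int) ≥ min_words
      then labels ++ [p.1] else labels) []
    = pmi_lexicon.foldl (fun labels p =>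
      if ((PySem.Set.ofList p.2).map
            (fun w => (tokens.foldl (fun d t => d.insert t (d.getD t 0 + 1)) PySem.Dict.empty).getD w 0)).sum
          ≥ min_words
      then labels ++ [p.1] else labels) []
  apply PySem.List.foldl_congr_mem
  intro acc p _hp
  rw [frame_score_eq tokens p.2]
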